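-- pv_equiv track=rewrite | github.com/nooransari911/tools-2025 | projects/Knowledge Base/py_practice/test.py | ct_substringv2
-- ===== SOURCE A (Python) =====
-- def ct_substringv2 (s, charsetlen, l = 0):
--
--
--     r = 0
--     # print (len (s))
--     ct = [0] * charsetlen
--     currchr = ""
--     currchr = s [l]
--     currsum = 0
--     transitionsidx = []
--     transitionschr = []
--     transitionsidx.append (l)
--     transitionschr.append (s [l])
--
--     inta = ord ("a")
--
--     while (r < len (s)):
--         ctindex = ord (s [r]) % inta
--
--         if (s [r] == currchr):
--             #ct [ctindex] += 1
--             currsum += 1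
--             r += 1
--         else:
--             #ct [ctindex] += 1
--             currsum = 0
--             currchr = s [r]
--             l = r
--             transitionsidx.append (r)
--             transitionschr.append (s [r])
--             #r += 1
--
--         ct [ctindex] = max (currsum, ct [ctindex])
--
--     return ct, transitionsidx, transitionschr
-- ===== SOURCE B (Python) =====
-- def ct_substringv2(s, charsetlen, l=0):
--     anchor = s[l]
--     n = len(s)
--     # pass 1: run-length decomposition of s into (start, char, length) triples
--     runs = []
--     i = 0
--     while i < n:
--         j = i + 1
--         while j < n and s[j] == s[i]:
--             j += 1
--         runs.append((i, s[i], j - i))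
--         i = j
--     # pass 2: best run length per ord(c) % ord('a') slot
--     ct = [0] * charsetlen
--     for _, c, k in runs:
--         h = ord(c) % ord("a")
--         ct[h] = max(ct[h], k)
--     # pass 3: transitions; seeded with [l]/[s[l]], and the run starting at index 0
--     # gets its own entry only when s[0] != s[l]
--     transitionsidx = [l]
--     transitionschr = [anchor]
--     for st, c, _ in runs:
--         if st != 0 or s[0] != anchor:
--             transitionsidx.append(st)
--             transitionschr.append(c)
--     return ct, transitionsidx, transitionschr
-- ===== Notes on version B (the rewrite author's own statement) =====
-- stated objective: alternative
-- what changed: A's single stuttering while-loop (which revisits run boundaries and re-maxes ct on every character) is replaced by a run-length decomposition of s followed by one ct max-update and one transition entry per run.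
-- outside the precondition, e.g. on ct_substringv2('abc', 1, 0): A raises IndexError, B raises IndexError; on ct_substringv2('', 5, 0): A raises IndexError, B raises IndexError
import Mathlib
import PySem

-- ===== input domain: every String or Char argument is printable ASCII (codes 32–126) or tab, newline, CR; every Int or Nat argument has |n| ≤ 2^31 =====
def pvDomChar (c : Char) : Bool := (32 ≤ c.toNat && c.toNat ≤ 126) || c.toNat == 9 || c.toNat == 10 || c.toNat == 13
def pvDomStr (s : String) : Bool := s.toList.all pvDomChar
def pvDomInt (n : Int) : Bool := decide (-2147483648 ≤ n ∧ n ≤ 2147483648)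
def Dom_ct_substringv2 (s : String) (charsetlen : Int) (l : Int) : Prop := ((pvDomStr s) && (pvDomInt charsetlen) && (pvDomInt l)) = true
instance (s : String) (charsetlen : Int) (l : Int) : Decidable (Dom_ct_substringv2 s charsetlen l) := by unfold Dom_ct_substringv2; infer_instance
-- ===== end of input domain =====

-- B replaces A's per-character stuttering while-loop (which revisits each run
-- boundary and does a max-update on ct at every character) by a run-length
-- decomposition of s followed by one max-update and one transition entry per run
-- (objective: alternative decomposition, same asymptotic cost).

-- ord(c) % ord('a'): exact, both operands are nonnegative and the divisor 97 is positive
def pvHash (c : Char) : Nat := c.toNat % 97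

-- ===== PORT A =====
-- the while loop; fuel = 2*len(s)+1 bounds its iterations (each step either
-- advances r or switches currchr so that the next step advances r)
def ctLoopA (cs : List Char) (fuel : Nat) (ct : List Int) (currchr : Char) (currsum : Int)
    (l : Int) (tidx : List Int) (tchr : List String) (r : Nat) :
    List Int × List Int × List String :=
  match fuel with
  | 0 => (ct, tidx, tchr)
  | fuel + 1 =>
    if r < cs.length then
      let c := cs.getD r ' '
      let ctindex := pvHash c
      if c = currchr then
        -- ct[ctindex] = max(currsum, ct[ctindex]) after currsum += 1; r += 1
        ctLoopA cs fuel (ct.set ctindex (max (currsum + 1) (ct.getD ctindex 0))) currchr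
          (currsum + 1) l tidx tchr (r + 1)
      else
        -- currsum = 0; currchr = s[r]; l = r; transitions appended; r unchanged
        ctLoopA cs fuel (ct.set ctindex (max 0 (ct.getD ctindex 0))) c 0 (r : Int)
          (tidx ++ [(r : Int)]) (tchr ++ [c.toString]) r
    else (ct, tidx, tchr)

def ct_substringv2 (s : String) (charsetlen : Int) (l : Int) : List Int × List Int × List String :=
  let cs := s.toList
  let ct := List.replicate charsetlen.toNat 0
  -- currchr = s[l]: Pre_ excludes the IndexError (pyGet? = none) case
  let currchr := (PySem.List.pyGet? cs l).getD ' '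
  ctLoopA cs (2 * cs.length + 1) ct currchr 0 l [l] [currchr.toString] 0

-- ===== PORT B =====
-- inner while of Source B: first index j' ≥ j with j' = len(s) or s[j'] != c
def pvRunScan (cs : List Char) (c : Char) (j : Nat) : Nat :=
  if j < cs.length ∧ cs.getD j ' ' = c then pvRunScan cs c (j + 1) else j
termination_by cs.length - j
decreasing_by omega

theorem pvRunScan_ge (cs : List Char) (c : Char) (j : Nat) : j ≤ pvRunScan cs c j := by
  fun_induction pvRunScan cs c j with
  | case1 j h ih => omega
  | case2 j _ => omega

-- outer while of Source B: the (start, char, length) triple of every maximal run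
def pvBuildRuns (cs : List Char) (i : Nat) : List (Nat × Char × Nat) :=
  if _h : i < cs.length then
    let c := cs.getD i ' '
    let j := pvRunScan cs c (i + 1)
    (i, c, j - i) :: pvBuildRuns cs j
  else []
termination_by cs.length - i
decreasing_by have := pvRunScan_ge cs (cs.getD i ' ') (i + 1); omega

-- pass 2 of Source B
def pvCtFold (runs : List (Nat × Char × Nat)) (ct : List Int) : List Int :=
  runs.foldl (fun ct r =>
    let h := pvHash r.2.1
    ct.set h (max (ct.getD h 0) ((r.2.2 : Int)))) ct

-- pass 3 of Source B
def pvTransFold (cs : List Char) (anchor : Char) (runs : List (Nat × Char × Nat))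
    (p : List Int × List String) : List Int × List String :=
  runs.foldl (fun p r =>
    if r.1 ≠ 0 ∨ cs.getD 0 ' ' ≠ anchor then (p.1 ++ [(r.1 : Int)], p.2 ++ [r.2.1.toString])
    else p) p

def ct_substringv2_alt (s : String) (charsetlen : Int) (l : Int) : List Int × List Int × List String :=
  let cs := s.toList
  let anchor := (PySem.List.pyGet? cs l).getD ' '
  let runs := pvBuildRuns cs 0
  let ct := pvCtFold runs (List.replicate charsetlen.toNat 0)
  let tp := pvTransFold cs anchor runs ([l], [anchor.toString])
  (ct, tp.1, tp.2)

-- ===== PRECONDITION & SPEC =====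
-- Pre_ excludes exactly the inputs where Python A raises: IndexError on s[l]
-- (empty s or l out of Python index range) and IndexError on ct[ord(c) % 97]
-- (some character of s hashing at or beyond charsetlen).
def Pre_ct_substringv2 (s : String) (charsetlen : Int) (l : Int) : Prop :=
  s.toList ≠ [] ∧ -(s.toList.length : Int) ≤ l ∧ l < (s.toList.length : Int) ∧
    s.toList.all (fun c => decide (((pvHash c : Nat) : Int) < charsetlen)) = true
instance (s : String) (charsetlen : Int) (l : Int) : Decidable (Pre_ct_substringv2 s charsetlen l) := by
  unfold Pre_ct_substringv2; infer_instance

def pvWitness_ct_substringv2 : String × Int × Int := ("aab", 30, 0)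

def Spec_ct_substringv2 (s : String) (charsetlen : Int) (l : Int) (out : List Int × List Int × List String) : Prop := out = ct_substringv2_alt s charsetlen l
instance (s : String) (charsetlen : Int) (l : Int) (out : List Int × List Int × List String) : Decidable (Spec_ct_substringv2 s charsetlen l out) := by unfold Spec_ct_substringv2; infer_instance

-- ===== CLAIM (what is proved, stated in full; the proofs are below) =====
def Claim_equal_ct_substringv2 : Prop := ∀ (s : String) (charsetlen : Int) (l : Int), Dom_ct_substringv2 s charsetlen l → Pre_ct_substringv2 s charsetlen l → Spec_ct_substringv2 s charsetlen l (ct_substringv2 s charsetlen l)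

-- ===== LEMMAS AND PROOFS =====

theorem pvRunScan_le (cs : List Char) (c : Char) (j : Nat) (h : j ≤ cs.length) :
    pvRunScan cs c j ≤ cs.length := by
  fun_induction pvRunScan cs c j with
  | case1 j h' ih => exact ih (by omega)
  | case2 j h' => omega

theorem pvRunScan_mem (cs : List Char) (c : Char) (j : Nat) :
    ∀ m, j ≤ m → m < pvRunScan cs c j → cs.getD m ' ' = c := by
  fun_induction pvRunScan cs c j with
  | case1 j h ih =>
    intro m hm hlt
    rcases Nat.eq_or_lt_of_le hm with rfl | h2
    · exact h.2
    · exact ih m h2 hlt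
  | case2 j _ => intro m hm hlt; omega

theorem pvRunScan_stop (cs : List Char) (c : Char) (j : Nat)
    (h : pvRunScan cs c j < cs.length) : cs.getD (pvRunScan cs c j) ' ' ≠ c := by
  fun_induction pvRunScan cs c j with
  | case1 j h' ih => exact ih h
  | case2 j h' =>
    intro hc
    exact h' ⟨h, hc⟩

theorem pvGetD_set_self (ct : List Int) (n : Nat) (v : Int) (h : n < ct.length) :
    (ct.set n v).getD n 0 = v := by
  simp [List.getD, h]

theorem pvSet_oob (ct : List Int) (n : Nat) (v : Int) (h : ct.length ≤ n) :
    ct.set n v = ct := by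
  apply List.set_eq_of_length_le h

theorem ctLoopA_done (cs : List Char) (fuel : Nat) (ct : List Int) (cc : Char) (cnt l' : Int)
    (ti : List Int) (tc : List String) (r : Nat) (h : cs.length ≤ r) :
    ctLoopA cs fuel ct cc cnt l' ti tc r = (ct, ti, tc) := by
  cases fuel with
  | zero => rfl
  | succ fuel =>
    rw [ctLoopA]
    simp [show ¬ r < cs.length by omega]

theorem ctLoopA_step_ne (cs : List Char) (fuel : Nat) (ct : List Int) (cc : Char) (cnt l' : Int)
    (ti : List Int) (tc : List String) (r : Nat) (hr : r < cs.length)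
    (hne : cs.getD r ' ' ≠ cc) :
    ctLoopA cs (fuel + 1) ct cc cnt l' ti tc r =
      ctLoopA cs fuel (ct.set (pvHash (cs.getD r ' ')) (max 0 (ct.getD (pvHash (cs.getD r ' ')) 0)))
        (cs.getD r ' ') 0 (r : Int) (ti ++ [(r : Int)]) (tc ++ [(cs.getD r ' ').toString]) r := by
  rw [ctLoopA]
  simp only [if_pos hr]
  rw [if_neg hne]

theorem pvBuildRuns_nil (cs : List Char) (i : Nat) (h : cs.length ≤ i) :
    pvBuildRuns cs i = [] := by
  rw [pvBuildRuns]
  simp [show ¬ i < cs.length by omega]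

theorem pvBuildRuns_cons (cs : List Char) (i : Nat) (h : i < cs.length) :
    pvBuildRuns cs i =
      (i, cs.getD i ' ', pvRunScan cs (cs.getD i ' ') (i + 1) - i) ::
        pvBuildRuns cs (pvRunScan cs (cs.getD i ' ') (i + 1)) := by
  rw [pvBuildRuns]
  simp [h]

-- a maximal run of k ≥ 1 characters equal to currchr, processed by A's loop
theorem ctLoopA_run (cs : List Char) (cc : Char) :
    ∀ (k r : Nat) (fuel : Nat) (ct : List Int) (cnt : Int) (l' : Int) (ti : List Int) (tc : List String),
    1 ≤ k → r + k ≤ cs.length → (∀ m, r ≤ m → m < r + k → cs.getD m ' ' = cc) →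
    ctLoopA cs (fuel + k) ct cc cnt l' ti tc r =
      ctLoopA cs fuel (ct.set (pvHash cc) (max (cnt + (k : Int)) (ct.getD (pvHash cc) 0)))
        cc (cnt + (k : Int)) l' ti tc (r + k) := by
  intro k
  induction k with
  | zero => intro r fuel ct cnt l' ti tc hk; omega
  | succ k ih =>
    intro r fuel ct cnt l' ti tc hk hle hch
    have hr : r < cs.length := by omega
    have hc : cs.getD r ' ' = cc := hch r (le_refl r) (by omega)
    rw [show fuel + (k + 1) = (fuel + k) + 1 by omega, ctLoopA]
    simp only [hr, if_pos, hc]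
    rcases Nat.eq_or_lt_of_le hk with hk1 | hk2
    · -- k = 0: single step
      have : k = 0 := by omega
      subst this
      simp
    · -- k ≥ 1: one step then IH at r+1
      have hk' : 1 ≤ k := by omega
      rw [ih (r + 1) fuel _ (cnt + 1) l' ti tc hk' (by omega)
        (fun m hm hlt => hch m (by omega) (by omega))]
      have harith : cnt + 1 + (k : Int) = cnt + ((k : Nat) + 1 : Nat) := by push_cast; ring
      by_cases hlen : pvHash cc < ct.length
      · rw [pvGetD_set_self ct _ _ hlen, List.set_set]
        have hmax : max (cnt + 1 + (k : Int)) (max (cnt + 1) (ct.getD (pvHash cc) 0))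
            = max (cnt + ((k : Nat) + 1 : Nat)) (ct.getD (pvHash cc) 0) := by
          rw [← max_assoc]
          have h1 : max (cnt + 1 + (k : Int)) (cnt + 1) = cnt + 1 + (k : Int) :=
            max_eq_left (by omega)
          rw [h1, harith]
        rw [hmax, harith]
        ring_nf
      · have hge : ct.length ≤ pvHash cc := by omega
        rw [pvSet_oob ct _ _ hge]
        rw [pvSet_oob ct _ _ hge, pvSet_oob ct _ _ hge, harith]
        ring_nf

-- from any run boundary i where currchr differs (and the index-0 special case
-- cannot fire spuriously), A's loop computes exactly B's two folds over the runs
theorem ctLoopA_runs (cs : List Char) (anchor : Char) :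
    ∀ (gas i fuel : Nat) (ct : List Int) (cc : Char) (cnt : Int) (l' : Int) (ti : List Int) (tc : List String),
    cs.length - i ≤ gas → i ≤ cs.length → 2 * (cs.length - i) ≤ fuel →
    (i = cs.length ∨ cs.getD i ' ' ≠ cc) →
    (0 < i ∨ cs.getD 0 ' ' ≠ anchor) →
    ctLoopA cs fuel ct cc cnt l' ti tc i =
      (pvCtFold (pvBuildRuns cs i) ct,
       (pvTransFold cs anchor (pvBuildRuns cs i) (ti, tc)).1,
       (pvTransFold cs anchor (pvBuildRuns cs i) (ti, tc)).2) := by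
  intro gas
  induction gas with
  | zero =>
    intro i fuel ct cc cnt l' ti tc hg hle hf hb hz
    have hi : i = cs.length := by omega
    rw [ctLoopA_done cs fuel ct cc cnt l' ti tc i (by omega), pvBuildRuns_nil cs i (by omega)]
    simp [pvCtFold, pvTransFold]
  | succ gas ih =>
    intro i fuel ct cc cnt l' ti tc hg hle hf hb hz
    rcases Nat.eq_or_lt_of_le hle with rfl | hlt
    · rw [ctLoopA_done cs fuel ct cc cnt l' ti tc _ (by omega), pvBuildRuns_nil cs _ (by omega)]
      simp [pvCtFold, pvTransFold]
    · have hne : cs.getD i ' ' ≠ cc := by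
        cases hb with
        | inl h => omega
        | inr h => exact h
      set c := cs.getD i ' ' with hc
      set j := pvRunScan cs c (i + 1) with hj
      have hji : i + 1 ≤ j := pvRunScan_ge cs c (i + 1)
      have hjle : j ≤ cs.length := pvRunScan_le cs c (i + 1) (by omega)
      have hfuel : fuel = (fuel - (j - i) - 1 + (j - i)) + 1 := by omega
      rw [hfuel]
      -- unfold one mismatch step of A
      rw [ctLoopA_step_ne cs _ ct cc cnt l' ti tc i hlt hne]
      -- then a maximal run of j - i matching characters
      rw [ctLoopA_run cs c (j - i) i _ _ 0 (i : Int) (ti ++ [(i : Int)]) (tc ++ [c.toString])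
        (by omega) (by omega)
        (fun m hm hlt' => by
          rcases Nat.eq_or_lt_of_le hm with rfl | h2
          · rfl
          · exact pvRunScan_mem cs c (i + 1) m h2 (by omega))]
      have hstep : i + (j - i) = j := by omega
      rw [hstep]
      -- recurse on the remaining runs
      rw [ih j _ _ c _ (i : Int) _ _ (by omega) hjle (by omega)
        (by
          rcases Nat.eq_or_lt_of_le hjle with heq | hlt2
          · exact Or.inl heq
          · exact Or.inr (pvRunScan_stop cs c (i + 1) hlt2))
        (Or.inl (by omega))]
      -- B side: peel the first run off both folds
      rw [pvBuildRuns_cons cs i hlt, ← hc, ← hj]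
      have hcond : (i ≠ 0 ∨ cs.getD 0 ' ' ≠ anchor) := by
        cases hz with
        | inl h => exact Or.inl (by omega)
        | inr h => exact Or.inr h
      have htf : pvTransFold cs anchor ((i, c, j - i) :: pvBuildRuns cs j) (ti, tc)
          = pvTransFold cs anchor (pvBuildRuns cs j) (ti ++ [(i : Int)], tc ++ [c.toString]) := by
        simp only [pvTransFold, List.foldl_cons]
        rw [if_pos hcond]
      rw [htf]
      have hcf : pvCtFold ((i, c, j - i) :: pvBuildRuns cs j) ct
          = pvCtFold (pvBuildRuns cs j)
              ((ct.set (pvHash c) (max 0 (ct.getD (pvHash c) 0))).set (pvHash c)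
                (max (0 + ((j - i : Nat) : Int))
                  ((ct.set (pvHash c) (max 0 (ct.getD (pvHash c) 0))).getD (pvHash c) 0))) := by
        simp only [pvCtFold, List.foldl_cons]
        congr 1
        by_cases hlen : pvHash c < ct.length
        · rw [pvGetD_set_self ct _ _ hlen, List.set_set]
          congr 1
          have hk1 : (1 : Int) ≤ ((j - i : Nat) : Int) := by
            have h1 : 1 ≤ j - i := by omega
            exact_mod_cast h1
          rw [zero_add, ← max_assoc]
          rw [max_comm (ct.getD (pvHash c) 0) ((j - i : Nat) : Int)]
          congr 1
          omega
        · have hge : ct.length ≤ pvHash c := by omega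
          simp [pvSet_oob, hge]
      rw [hcf]

-- ===== VERDICT (by name: the statement is the Claim_ definition above) =====
theorem ct_substringv2_spec : Claim_equal_ct_substringv2 := by
  intro s charsetlen l _hdom _hpre
  unfold Spec_ct_substringv2 ct_substringv2 ct_substringv2_alt
  dsimp only
  set cs := s.toList with hcs
  set anchor := (PySem.List.pyGet? cs l).getD ' ' with hanchor
  set ct0 := List.replicate charsetlen.toNat (0 : Int) with hct0
  rcases Nat.eq_zero_or_pos cs.length with hn | hn
  · -- empty string: loop body never runs; no runs on the B side
    rw [ctLoopA_done cs _ ct0 anchor 0 l [l] [anchor.toString] 0 (by omega),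
      pvBuildRuns_nil cs 0 (by omega)]
    simp [pvCtFold, pvTransFold]
  · by_cases h0 : cs.getD 0 ' ' = anchor
    · -- first run matches currchr from the start: process it, then the rest
      set j := pvRunScan cs anchor 1 with hj
      have hji : 1 ≤ j := pvRunScan_ge cs anchor 1
      have hjle : j ≤ cs.length := pvRunScan_le cs anchor 1 (by omega)
      rw [show 2 * cs.length + 1 = (2 * cs.length + 1 - j) + j from by omega]
      rw [ctLoopA_run cs anchor j 0 _ ct0 0 l [l] [anchor.toString] (by omega) (by omega)
        (fun m hm hlt => by
          rcases Nat.eq_zero_or_pos m with rfl | h2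
          · exact h0
          · exact pvRunScan_mem cs anchor 1 m (by omega) (by omega))]
      simp only [zero_add]
      rw [ctLoopA_runs cs anchor (cs.length) j _ _ anchor _ l [l] [anchor.toString]
        (by omega) hjle (by omega)
        (by
          rcases Nat.eq_or_lt_of_le hjle with heq | hlt2
          · exact Or.inl heq
          · exact Or.inr (pvRunScan_stop cs anchor 1 hlt2))
        (Or.inl (by omega))]
      rw [pvBuildRuns_cons cs 0 (by omega), h0, ← hj, Nat.sub_zero]
      have htf : pvTransFold cs anchor ((0, anchor, j) :: pvBuildRuns cs j) ([l], [anchor.toString])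
          = pvTransFold cs anchor (pvBuildRuns cs j) ([l], [anchor.toString]) := by
        simp only [pvTransFold, List.foldl_cons]
        have : ¬((0 : Nat) ≠ 0 ∨ cs.getD 0 ' ' ≠ anchor) := by
          rw [not_or]; exact ⟨fun h => h rfl, not_not_intro h0⟩
        rw [if_neg this]
      have hcf : pvCtFold ((0, anchor, j) :: pvBuildRuns cs j) ct0
          = pvCtFold (pvBuildRuns cs j)
              (ct0.set (pvHash anchor) (max ((j : Nat) : Int) (ct0.getD (pvHash anchor) 0))) := by
        simp only [pvCtFold, List.foldl_cons]
        congr 1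
        rw [max_comm]
      rw [htf, hcf]
    · -- first character already differs from s[l]: index 0 is itself a run boundary
      rw [ctLoopA_runs cs anchor (cs.length) 0 _ ct0 anchor 0 l [l] [anchor.toString]
        (by omega) (by omega) (by omega) (Or.inr h0) (Or.inr h0)]
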